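-- pv_equiv track=rewrite | github.com/1nyo/jyotison | calc/jaimini.py | _count_planets_in_same_sign
-- ===== SOURCE A (Python) =====
-- from typing import Dict, List, Tuple, Optional, Literal
--
-- def _planet_sign(d1: Dict, pname: str) -> Optional[str]:
--     """
--     惑星のサイン略号を返す。
--     d1["planets"][pname]["sign"] を想定。
--     """
--     return d1.get("planets", {}).get(pname, {}).get("sign")
--
-- def _count_planets_in_same_sign(d1: Dict, lord_name: str) -> int:
--     """
--     支配星と同じサインにいる惑星の数（支配星自身は含めない）。
--     """
--     l_sign = _planet_sign(d1, lord_name)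
--     if not l_sign:
--         return 0
--
--     cnt = 0
--     for pname, pdata in d1.get("planets", {}).items():
--         if pname == lord_name:
--             continue
--         if pdata.get("sign") == l_sign:
--             cnt += 1
--     return cnt
-- ===== SOURCE B (Python) =====
-- def _count_planets_in_same_sign(d1, lord_name):
--     """
--     Same result as A: build a frequency table of all planet signs in one
--     pass, then answer with a single lookup, subtracting the lord itself.
--     """
--     planets = d1.get("planets", {})
--     l_sign = planets.get(lord_name, {}).get("sign")
--     if not l_sign:
--         return 0
--     freq = {}
--     for pdata in planets.values():
--         s = pdata.get("sign")
--         freq[s] = freq.get(s, 0) + 1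
--     return freq.get(l_sign, 0) - 1
-- ===== Notes on version B (the rewrite author's own statement) =====
-- stated objective: alternative
-- what changed: A's filtered loop (skip the lord by name, compare each remaining planet's sign to the lord's) is replaced by building a frequency table of all planet signs in one pass and answering with a single table lookup minus one for the lord's own entry; Pre_ only excludes dict-as-list encodings that repeat the lord's key, which no real Python dict can contain.
import Mathlib
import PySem

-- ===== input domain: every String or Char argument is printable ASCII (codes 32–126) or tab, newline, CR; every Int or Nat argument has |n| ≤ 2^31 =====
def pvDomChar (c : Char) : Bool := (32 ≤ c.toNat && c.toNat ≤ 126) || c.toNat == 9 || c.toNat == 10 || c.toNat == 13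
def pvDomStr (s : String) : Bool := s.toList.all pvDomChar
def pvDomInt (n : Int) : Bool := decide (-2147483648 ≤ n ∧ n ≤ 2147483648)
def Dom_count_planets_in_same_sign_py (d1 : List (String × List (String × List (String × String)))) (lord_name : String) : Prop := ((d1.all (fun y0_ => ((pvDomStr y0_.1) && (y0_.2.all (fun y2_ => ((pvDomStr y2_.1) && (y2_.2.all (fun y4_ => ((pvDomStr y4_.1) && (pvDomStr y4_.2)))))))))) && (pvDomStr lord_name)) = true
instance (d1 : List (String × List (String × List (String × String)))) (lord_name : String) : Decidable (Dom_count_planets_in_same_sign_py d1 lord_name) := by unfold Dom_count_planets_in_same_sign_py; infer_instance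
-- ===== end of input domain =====

-- B replaces A's filtered counting loop (skip the lord, compare each sign) by building a
-- frequency table of ALL planet signs once and answering with one lookup minus the lord's
-- own entry; same O(n) cost, a different data-structure decomposition.

-- ===== PORT A =====
-- d1.get("planets", {}).get(pname, {}).get("sign"), as in A's _planet_sign
def planet_sign_py (d1 : List (String × List (String × List (String × String)))) (pname : String) : Option String :=
  PySem.Dict.get? (PySem.Dict.mk (PySem.Dict.getD (PySem.Dict.mk (PySem.Dict.getD (PySem.Dict.mk d1) "planets" [])) pname [])) "sign"

def count_planets_in_same_sign_py (d1 : List (String × List (String × List (String × String)))) (lord_name : String) : Int :=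
  let l_sign := planet_sign_py d1 lord_name
  match l_sign with
  | none => 0
  | some s =>
    if s = "" then 0   -- Python truthiness: `if not l_sign` is also taken for the empty string
    else
      (PySem.Dict.getD (PySem.Dict.mk d1) "planets" []).foldl
        (fun cnt p =>
          if p.1 = lord_name then cnt   -- continue
          else if PySem.Dict.get? (PySem.Dict.mk p.2) "sign" = some s then cnt + 1 else cnt) 0

-- ===== PORT B =====
def count_planets_in_same_sign_py_alt (d1 : List (String × List (String × List (String × String)))) (lord_name : String) : Int :=
  let planets := PySem.Dict.getD (PySem.Dict.mk d1) "planets" []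
  let l_sign := PySem.Dict.get? (PySem.Dict.mk (PySem.Dict.getD (PySem.Dict.mk planets) lord_name [])) "sign"
  match l_sign with
  | none => 0
  | some s =>
    if s = "" then 0
    else
      let freq : PySem.Dict (Option String) Int :=   -- freq[s] = freq.get(s, 0) + 1 over all planets
        planets.foldl
          (fun f p =>
            PySem.Dict.modify f (PySem.Dict.get? (PySem.Dict.mk p.2) "sign") 0 (· + 1))
          PySem.Dict.empty
      PySem.Dict.getD freq (some s) 0 - 1

-- ===== PRECONDITION & SPEC =====
-- Pre_ excludes only association lists in which the lord's key occurs more than once in the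
-- "planets" list: a Python dict cannot contain a duplicate key, so no actual Python input is
-- excluded; on such model-only lists A's skip-every-duplicate vs B's subtract-one is a
-- defensible corner of the dict-as-list encoding.
def Pre_count_planets_in_same_sign_py (d1 : List (String × List (String × List (String × String)))) (lord_name : String) : Prop :=
  ((PySem.Dict.getD (PySem.Dict.mk d1) "planets" []).map Prod.fst).count lord_name ≤ 1
instance (d1 : List (String × List (String × List (String × String)))) (lord_name : String) : Decidable (Pre_count_planets_in_same_sign_py d1 lord_name) := by unfold Pre_count_planets_in_same_sign_py; infer_instance

def pvWitness_count_planets_in_same_sign_py : (List (String × List (String × List (String × String)))) × String :=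
  ([("planets", [("Sun", [("sign", "Ar")]), ("Moon", [("sign", "Ar")]), ("Mars", [("sign", "Ta")])])], "Sun")

def Spec_count_planets_in_same_sign_py (d1 : List (String × List (String × List (String × String)))) (lord_name : String) (out : Int) : Prop := out = count_planets_in_same_sign_py_alt d1 lord_name
instance (d1 : List (String × List (String × List (String × String)))) (lord_name : String) (out : Int) : Decidable (Spec_count_planets_in_same_sign_py d1 lord_name out) := by unfold Spec_count_planets_in_same_sign_py; infer_instance

-- ===== CLAIM (what is proved, stated in full; the proofs are below) =====
def Claim_equal_count_planets_in_same_sign_py : Prop := ∀ (d1 : List (String × List (String × List (String × String)))) (lord_name : String), Dom_count_planets_in_same_sign_py d1 lord_name → Pre_count_planets_in_same_sign_py d1 lord_name → Spec_count_planets_in_same_sign_py d1 lord_name (count_planets_in_same_sign_py d1 lord_name)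

-- ===== LEMMAS AND PROOFS =====

-- proof-only abbreviation: the sign of one planet record
def pvSg (pd : List (String × String)) : Option String := PySem.Dict.get? (PySem.Dict.mk pd) "sign"

-- In a planet list not containing the lord's key, A's filtered count is the plain sign count.
lemma pv_count_no_lord (lord : String) (s : String) :
    ∀ (l : List (String × List (String × String))),
      lord ∉ l.map Prod.fst →
      l.countP (fun p => !(p.1 == lord) && (pvSg p.2 == some s))
        = (l.map (fun p => pvSg p.2)).count (some s) := by
  intro l
  induction l with
  | nil => simp
  | cons hd tl ih =>
    intro h
    simp only [List.map_cons, List.mem_cons] at h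
    have h1 : hd.1 ≠ lord := fun e => h (Or.inl e.symm)
    have h2 := ih (fun m => h (Or.inr m))
    have hb : (hd.1 == lord) = false := by simp [h1]
    rw [List.countP_cons, List.map_cons, List.count_cons, h2, hb]
    by_cases hs : pvSg hd.2 = some s <;> simp [hs]

-- If the lord occurs at most once and its record's sign is `some s`, the total number of
-- records whose sign is `some s` is A's filtered count plus one (the lord's own record).
lemma pv_count_main (lord : String) (s : String) :
    ∀ (l : List (String × List (String × String))),
      (l.map Prod.fst).count lord ≤ 1 →
      pvSg (PySem.Dict.getD (PySem.Dict.mk l) lord []) = some s →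
      (l.map (fun p => pvSg p.2)).count (some s)
        = l.countP (fun p => !(p.1 == lord) && (pvSg p.2 == some s)) + 1 := by
  intro l
  induction l with
  | nil =>
    intro _ hget
    simp [PySem.Dict.getD, PySem.Dict.get?, pvSg] at hget
  | cons hd tl ih =>
    intro hcnt hget
    by_cases hk : hd.1 = lord
    · have hkb : (hd.1 == lord) = true := by simp [hk]
      have hget' : pvSg hd.2 = some s := by
        simpa [PySem.Dict.getD, PySem.Dict.get?, PySem.Dict.mk, List.find?, hkb, pvSg] using hget
      have htl : lord ∉ tl.map Prod.fst := by
        intro hmem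
        have hpos : 0 < (tl.map Prod.fst).count lord := List.count_pos_iff.mpr hmem
        rw [List.map_cons, List.count_cons, hkb] at hcnt
        simp at hcnt
        omega
      have hpred : (!(hd.1 == lord) && (pvSg hd.2 == some s)) = false := by simp [hkb]
      rw [List.map_cons, List.count_cons, List.countP_cons, hpred,
        pv_count_no_lord lord s tl htl, hget']
      simp
    · have hkb : (hd.1 == lord) = false := by simp [hk]
      have hget' : pvSg (PySem.Dict.getD (PySem.Dict.mk tl) lord []) = some s := by
        simpa [PySem.Dict.getD, PySem.Dict.get?, PySem.Dict.mk, List.find?, hkb, pvSg] using hget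
      have hcnt' : (tl.map Prod.fst).count lord ≤ 1 := by
        rw [List.map_cons, List.count_cons, hkb] at hcnt
        omega
      rw [List.map_cons, List.count_cons, List.countP_cons, ih hcnt' hget', hkb]
      by_cases hs : pvSg hd.2 = some s <;> simp [hs]

theorem pv_main (d1 : List (String × List (String × List (String × String)))) (lord_name : String)
    (hpre : Pre_count_planets_in_same_sign_py d1 lord_name) :
    count_planets_in_same_sign_py d1 lord_name = count_planets_in_same_sign_py_alt d1 lord_name := by
  unfold Pre_count_planets_in_same_sign_py at hpre
  unfold count_planets_in_same_sign_py count_planets_in_same_sign_py_alt planet_sign_py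
  simp only
  cases hget : PySem.Dict.get? (PySem.Dict.mk (PySem.Dict.getD (PySem.Dict.mk (PySem.Dict.getD (PySem.Dict.mk d1) "planets" [])) lord_name [])) "sign" with
  | none => rfl
  | some s =>
    by_cases hs : s = ""
    · simp [hs]
    · simp only [hs, if_false]
      -- A's loop is a filtered count
      have hA : (PySem.Dict.getD (PySem.Dict.mk d1) "planets" []).foldl
          (fun cnt p => if p.1 = lord_name then cnt
            else if PySem.Dict.get? (PySem.Dict.mk p.2) "sign" = some s then cnt + 1 else cnt) 0
          = (((PySem.Dict.getD (PySem.Dict.mk d1) "planets" []).countP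
              (fun p => !(p.1 == lord_name) && (pvSg p.2 == some s)) : Nat) : Int) := by
        have hcong : ∀ (l : List (String × List (String × String))) (a : Int), l.foldl
            (fun cnt p => if p.1 = lord_name then cnt
              else if PySem.Dict.get? (PySem.Dict.mk p.2) "sign" = some s then cnt + 1 else cnt) a
            = l.foldl
              (fun cnt p => if (fun p => !(p.1 == lord_name) && (pvSg p.2 == some s)) p = true then cnt + 1 else cnt) a := by
          intro l
          induction l with
          | nil => intro a; rfl
          | cons hd tl ih =>
            intro a
            simp only [List.foldl_cons, ih]
            congr 1
            by_cases h1 : hd.1 = lord_name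
            · simp [h1]
            · simp [h1, pvSg]
        rw [hcong, PySem.List.foldl_if_add_one]
        simp
      -- B's table lookup is the plain sign count
      have hB : PySem.Dict.getD
          ((PySem.Dict.getD (PySem.Dict.mk d1) "planets" []).foldl (fun f p =>
            PySem.Dict.modify f (PySem.Dict.get? (PySem.Dict.mk p.2) "sign") 0 (· + 1)) PySem.Dict.empty)
          (some s) 0
          = ((((PySem.Dict.getD (PySem.Dict.mk d1) "planets" []).map (fun p => pvSg p.2)).count (some s) : Nat) : Int) := by
        rw [← List.foldl_map (f := fun p : String × List (String × String) => PySem.Dict.get? (PySem.Dict.mk p.2) "sign") (g := fun f x => PySem.Dict.modify f x 0 (· + 1))]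
        rw [PySem.Dict.getD_foldl_modify_add_one]
        simp [pvSg]
      rw [hA, hB, pv_count_main lord_name s _ hpre hget]
      push_cast
      ring

-- ===== VERDICT (by name: the statement is the Claim_ definition above) =====
theorem count_planets_in_same_sign_py_spec : Claim_equal_count_planets_in_same_sign_py := by
  intro d1 lord_name _ hpre
  unfold Spec_count_planets_in_same_sign_py
  exact pv_main d1 lord_name hpre
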